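-- pv_equiv track=rewrite | github.com/activeloopai/deeplake | python/deeplake/integrations/labelbox/labelbox_converter.py | existing_sub_ranges_
-- ===== SOURCE A (Python) =====
-- def existing_sub_ranges_(frames, r, key_frames):
--     end = r[1]
--     sub_ranges = [(r[0], end)]
--     for i in key_frames:
--         if str(i) not in frames:
--             continue
--         if i <= r[0] or i >= end:
--             continue
--         sub_ranges[-1] = (sub_ranges[-1][0], i)
--         sub_ranges.append((i, end))
--     return sub_ranges
-- ===== SOURCE B (Python) =====
-- def existing_sub_ranges_(frames, r, key_frames):
--     end = r[1]
--     points = [i for i in key_frames if str(i) in frames and r[0] < i < end]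
--     bounds = [r[0]] + points + [end]
--     return list(zip(bounds, bounds[1:]))
-- ===== Notes on version B (the rewrite author's own statement) =====
-- stated objective: simpler
-- what changed: Instead of threading a mutable last-range through one loop, B first filters the valid split points, builds the boundary list [r0]+points+[end], and zips it with its own tail to form the ranges.
import Mathlib
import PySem

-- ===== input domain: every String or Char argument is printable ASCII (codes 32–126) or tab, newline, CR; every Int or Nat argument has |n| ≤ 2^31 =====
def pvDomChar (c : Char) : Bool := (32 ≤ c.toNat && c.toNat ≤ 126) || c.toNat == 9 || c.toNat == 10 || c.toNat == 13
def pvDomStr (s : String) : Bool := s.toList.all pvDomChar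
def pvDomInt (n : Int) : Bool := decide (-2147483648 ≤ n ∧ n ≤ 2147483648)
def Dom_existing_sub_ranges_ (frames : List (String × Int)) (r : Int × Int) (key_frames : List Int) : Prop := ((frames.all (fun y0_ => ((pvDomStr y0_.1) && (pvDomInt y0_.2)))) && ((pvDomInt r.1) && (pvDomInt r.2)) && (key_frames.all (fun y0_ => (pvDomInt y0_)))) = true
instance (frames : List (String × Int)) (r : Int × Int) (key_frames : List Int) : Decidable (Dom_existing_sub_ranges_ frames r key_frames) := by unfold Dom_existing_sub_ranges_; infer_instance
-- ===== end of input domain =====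

-- B separates filtering from range construction: it builds the valid split points, forms the
-- boundary list [r0] ++ points ++ [end], and zips it with its tail — equal to A on all inputs.


-- ===== PORT A =====
-- 'str(i) in frames' on the dict = key membership in the association list
def pvMem_ (frames : List (String × Int)) (i : Int) : Bool :=
  frames.any (fun p => p.1 == PySem.Int.toStr i)

-- the for-loop of A: sub_ranges is the accumulator; sub_ranges[-1] mutation = dropLast ++ updated last
def pvALoop_ (frames : List (String × Int)) (r0 e : Int) : List Int → List (Int × Int) → List (Int × Int)
  | [], acc => acc
  | i :: rest, acc =>
    if ¬ pvMem_ frames i then pvALoop_ frames r0 e rest acc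
    else if i ≤ r0 ∨ i ≥ e then pvALoop_ frames r0 e rest acc
    else pvALoop_ frames r0 e rest (acc.dropLast ++ [((acc.getLastD (0, 0)).1, i), (i, e)])

def existing_sub_ranges_ (frames : List (String × Int)) (r : Int × Int) (key_frames : List Int) : List (Int × Int) :=
  pvALoop_ frames r.1 r.2 key_frames [(r.1, r.2)]

-- ===== PORT B =====
def existing_sub_ranges__alt (frames : List (String × Int)) (r : Int × Int) (key_frames : List Int) : List (Int × Int) :=
  let e := r.2
  let points := key_frames.filter (fun i => pvMem_ frames i && decide (r.1 < i) && decide (i < e))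
  let bounds := r.1 :: points ++ [e]
  bounds.zip bounds.tail

-- ===== PRECONDITION & SPEC =====
def Spec_existing_sub_ranges_ (frames : List (String × Int)) (r : Int × Int) (key_frames : List Int) (out : List (Int × Int)) : Prop := out = existing_sub_ranges__alt frames r key_frames
instance (frames : List (String × Int)) (r : Int × Int) (key_frames : List Int) (out : List (Int × Int)) : Decidable (Spec_existing_sub_ranges_ frames r key_frames out) := by unfold Spec_existing_sub_ranges_; infer_instance

-- ===== CLAIM (what is proved, stated in full; the proofs are below) =====
def Claim_equal_existing_sub_ranges_ : Prop := ∀ (frames : List (String × Int)) (r : Int × Int) (key_frames : List Int), Dom_existing_sub_ranges_ frames r key_frames → Spec_existing_sub_ranges_ frames r key_frames (existing_sub_ranges_ frames r key_frames)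

-- ===== LEMMAS AND PROOFS =====

-- one accepted key frame i turns the zipped-boundaries state for pts into the one for pts ++ [i]
theorem pvZip_step : ∀ (pts : List Int) (x e i : Int) (d : Int × Int),
    ((x :: pts ++ [e]).zip (pts ++ [e])).dropLast
      ++ [((((x :: pts ++ [e]).zip (pts ++ [e])).getLastD d).1, i), (i, e)]
    = (x :: (pts ++ [i]) ++ [e]).zip ((pts ++ [i]) ++ [e])
  | [], x, e, i, d => by simp [List.zip]
  | p :: ps, x, e, i, d => by
    have h := pvZip_step ps p e i (x, p)
    obtain ⟨q, l', hq⟩ : ∃ q l', ps ++ [e] = q :: l' := by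
      cases ps <;> exact ⟨_, _, rfl⟩
    obtain ⟨q2, l2, hq2⟩ : ∃ q2 l2, ps ++ [i] ++ [e] = q2 :: l2 := by
      cases ps <;> exact ⟨_, _, rfl⟩
    simp only [List.cons_append, hq, hq2, List.zip_cons_cons, List.dropLast_cons₂,
      List.getLastD_cons] at h ⊢
    simp only [List.getLastD_eq_getLast?] at h
    simp [h]

-- loop invariant: the accumulator is always the zip of the boundary list built so far
theorem pvLoop_inv (frames : List (String × Int)) (r0 e : Int) (ks : List Int) :
    ∀ pts : List Int,
      pvALoop_ frames r0 e ks ((r0 :: pts ++ [e]).zip (pts ++ [e]))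
      = (r0 :: (pts ++ ks.filter (fun i => pvMem_ frames i && decide (r0 < i) && decide (i < e))) ++ [e]).zip
          ((pts ++ ks.filter (fun i => pvMem_ frames i && decide (r0 < i) && decide (i < e))) ++ [e]) := by
  induction ks with
  | nil => intro pts; simp [pvALoop_]
  | cons i rest ih =>
    intro pts
    by_cases hm : pvMem_ frames i = true
    · by_cases hskip : i ≤ r0 ∨ i ≥ e
      · have hfilter : (pvMem_ frames i && decide (r0 < i) && decide (i < e)) = false := by
          rcases hskip with h | h <;> simp [hm] <;> omega
        simp only [pvALoop_, hm, not_true, if_false, hskip, if_true]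
        rw [ih pts]
        simp only [List.filter_cons, hfilter, Bool.false_eq_true, if_false]
      · have h1 : r0 < i := by omega
        have h2 : i < e := by omega
        have hfilter : (pvMem_ frames i && decide (r0 < i) && decide (i < e)) = true := by
          simp [hm, h1, h2]
        simp only [pvALoop_, hm, not_true, if_false, hskip, if_true]
        rw [pvZip_step pts r0 e i (0, 0), ih (pts ++ [i])]
        simp only [List.filter_cons, hfilter, if_true, List.append_assoc, List.cons_append,
          List.singleton_append, List.nil_append]
    · have hfilter : (pvMem_ frames i && decide (r0 < i) && decide (i < e)) = false := by
        simp [hm]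
      simp only [pvALoop_]
      rw [if_pos (by simp [hm]), ih pts]
      simp only [List.filter_cons, hfilter, Bool.false_eq_true, if_false]

-- ===== VERDICT (by name: the statement is the Claim_ definition above) =====
theorem existing_sub_ranges__spec : Claim_equal_existing_sub_ranges_ := by
  intro frames r key_frames _
  unfold Spec_existing_sub_ranges_ existing_sub_ranges_ existing_sub_ranges__alt
  have h := pvLoop_inv frames r.1 r.2 key_frames []
  simpa [List.zip] using h
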